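-- pv_equiv track=rewrite | github.com/Evgeny-Mamaev/code-correcting-n-errors | linearcode.py | partition_by_is_power_of_two
-- ===== SOURCE A (Python) =====
-- def partition_by_is_power_of_two(num):
--     """
--     Partitions the binary representation
--     of all the preceding numbers including
--     the given number by the criteria is it
--     the power of 2.
--     :param num: a number to analyse.
--     :return: a tuple of two lists:
--     the first one is the powers of 2,
--     the second one is not the powers of 2.
--     """
--     powers_of_two = []
--     not_powers_of_two = []
--     for i in range(num):
--         if is_power_of_two(num=i + 1):
--             powers_of_two.append(i + 1)
--         else:
--             not_powers_of_two.append(i + 1)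
--     return powers_of_two, not_powers_of_two
--
-- def is_power_of_two(num):
--     """
--     Determines the binary length of the number and
--     checks whether it has only one 1 => the power of 2.
--     :param num: a number to check.
--     :return: true if the number has only one 1
--     and all the remaining 0, false otherwise.
--     """
--     counter = 0
--     for i in (range(len(bin(num)) - 2)):
--         if num & 1:
--             counter += 1
--         num >>= 1
--         i += 1
--     return counter == 1
-- ===== SOURCE B (Python) =====
-- def partition_by_is_power_of_two(num):
--     """
--     Single pass over 1..num keeping a pointer to the next power of two:
--     a number is a power of two exactly when it equals the pointer, which
--     is then doubled -- O(1) per number instead of a per-number bit scan.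
--     """
--     powers_of_two = []
--     not_powers_of_two = []
--     next_power = 1
--     for i in range(1, num + 1):
--         if i == next_power:
--             powers_of_two.append(i)
--             next_power *= 2
--         else:
--             not_powers_of_two.append(i)
--     return powers_of_two, not_powers_of_two
-- ===== Notes on version B (the rewrite author's own statement) =====
-- stated objective: faster
-- what changed: Replaced the per-number bit-counting test (building bin(i) and scanning its bits for every i) by a single pass that keeps a next-power-of-two pointer and classifies each number with one integer comparison.
import Mathlib
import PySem

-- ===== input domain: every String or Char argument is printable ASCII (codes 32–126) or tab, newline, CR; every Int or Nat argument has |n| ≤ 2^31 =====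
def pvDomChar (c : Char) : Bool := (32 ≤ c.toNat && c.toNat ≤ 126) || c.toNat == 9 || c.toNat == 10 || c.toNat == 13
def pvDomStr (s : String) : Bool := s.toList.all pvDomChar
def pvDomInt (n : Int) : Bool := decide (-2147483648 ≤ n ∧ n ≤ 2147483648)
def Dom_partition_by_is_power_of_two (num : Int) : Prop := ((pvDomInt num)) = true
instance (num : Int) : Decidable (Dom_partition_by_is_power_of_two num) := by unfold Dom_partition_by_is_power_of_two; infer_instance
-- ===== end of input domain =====

-- B replaces A's per-number bit-count test by a single pass with a next-power-of-two pointer (objective: faster).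


-- ===== PORT A =====
-- helper is_power_of_two: 'len(bin(num)) - 2' is ((toBinChars0b num).length - 2);
-- 'num & 1' truthiness is 'band num 1 ≠ 0'; 'num >>= 1' is '>>> 1' (Python's floor shift);
-- the loop variable i is unused by the body (the 'i += 1' is a no-op on the range).
def pv_is_power_of_two (num : Int) : Bool :=
  let st := (List.range ((PySem.Int.toBinChars0b num).length - 2)).foldl
    (fun (st : Int × Int) _ =>
      (if PySem.Int.band st.2 1 ≠ 0 then st.1 + 1 else st.1, st.2 >>> (1 : Nat)))
    ((0 : Int), num)
  st.1 == 1

def partition_by_is_power_of_two (num : Int) : List Int × List Int :=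
  (PySem.List.pyRange 0 num 1).foldl
    (fun (st : List Int × List Int) i =>
      if pv_is_power_of_two (i + 1) then (st.1 ++ [i + 1], st.2)
      else (st.1, st.2 ++ [i + 1]))
    ([], [])

-- ===== PORT B =====
def partition_by_is_power_of_two_alt (num : Int) : List Int × List Int :=
  let st := (PySem.List.pyRange 1 (num + 1) 1).foldl
    (fun (st : List Int × List Int × Int) i =>
      if i == st.2.2 then (st.1 ++ [i], st.2.1, st.2.2 * 2)
      else (st.1, st.2.1 ++ [i], st.2.2))
    ([], [], (1 : Int))
  (st.1, st.2.1)

-- ===== PRECONDITION & SPEC =====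
def Spec_partition_by_is_power_of_two (num : Int) (out : List Int × List Int) : Prop := out = partition_by_is_power_of_two_alt num
instance (num : Int) (out : List Int × List Int) : Decidable (Spec_partition_by_is_power_of_two num out) := by unfold Spec_partition_by_is_power_of_two; infer_instance

-- ===== CLAIM (what is proved, stated in full; the proofs are below) =====
def Claim_equal_partition_by_is_power_of_two : Prop := ∀ (num : Int), Dom_partition_by_is_power_of_two num → Spec_partition_by_is_power_of_two num (partition_by_is_power_of_two num)

-- ===== LEMMAS AND PROOFS =====

-- a fold that ignores the list elements is an iterate of its step
theorem pv_foldl_range_ignore {St : Type} (g : St → St) :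
    ∀ (k : Nat) (st : St), (List.range k).foldl (fun s _ => g s) st = g^[k] st := by
  intro k
  induction k with
  | zero => intro st; simp
  | succ k ih =>
    intro st
    rw [List.range_succ, List.foldl_append, ih, Function.iterate_succ_apply']
    rfl

-- length of Python's binary digit string: (toDigits 2 n).length = max 1 (bitLength n)
theorem pv_toDigitsCore_two_length :
    ∀ (f n : Nat) (l : List Char), 0 < f → n < 2 ^ f →
      (Nat.toDigitsCore 2 f n l).length = l.length + max 1 (PySem.Int.bitLength (n : Int)) := by
  intro f
  induction f with
  | zero => intro n l h; omega
  | succ f ih =>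
    intro n l _ hn
    rw [Nat.toDigitsCore]
    by_cases h2 : n / 2 = 0
    · have hn1 : n ≤ 1 := by omega
      interval_cases n <;> simp [h2, PySem.Int.bitLength_zero] <;> decide
    · rw [if_neg h2]
      have hnpos : 0 < n := by omega
      have hf : 0 < f := by
        by_contra hf
        have : f = 0 := by omega
        subst this; simp [pow_succ] at hn; omega
      have hhalf : n / 2 < 2 ^ f := by
        have := Nat.pow_succ 2 f
        omega
      rw [ih (n / 2) (Nat.digitChar (n % 2) :: l) hf hhalf]
      have hb := PySem.Int.bitLength_natCast (m := n) hnpos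
      have hbpos : 1 ≤ PySem.Int.bitLength ((n / 2 : Nat) : Int) := by
        have hpos : 0 < n / 2 := by omega
        have := PySem.Int.bitLength_natCast (m := n / 2) hpos
        omega
      simp only [List.length_cons]
      omega

theorem pv_binlen (n : Nat) (hn : 0 < n) :
    (PySem.Int.toBinChars0b (n : Int)).length - 2 = PySem.Int.bitLength (n : Int) := by
  have h0 : ¬ ((n : Int) < 0) := by omega
  have hb : 1 ≤ PySem.Int.bitLength (n : Int) := by
    have := PySem.Int.bitLength_natCast (m := n) hn
    omega
  simp only [PySem.Int.toBinChars0b]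
  rw [if_neg h0]
  simp only [Int.toNat_natCast, Nat.toDigits, List.length_cons]
  rw [pv_toDigitsCore_two_length (n + 1) n [] (by omega)
    (by have h1 := Nat.lt_two_pow_self (n := n)
        have h2 : (2:Nat) ^ n ≤ 2 ^ (n + 1) := Nat.pow_le_pow_right (by omega) (by omega)
        omega)]
  simp
  omega

-- the counting loop of is_power_of_two computes bitCount
theorem pv_counter_iterate :
    ∀ (n : Nat) (c : Int),
      (fun (st : Int × Int) =>
        ((if PySem.Int.band st.2 1 ≠ 0 then st.1 + 1 else st.1), st.2 >>> (1 : Nat)))^[PySem.Int.bitLength (n : Int)]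
        (c, (n : Int)) = (c + (PySem.Int.bitCount (n : Int) : Int), 0) := by
  intro n
  induction n using Nat.strong_induction_on with
  | _ n ih =>
    intro c
    by_cases hn : n = 0
    · subst hn; simp [PySem.Int.bitLength_zero, PySem.Int.bitCount_zero]
    · have hnpos : 0 < n := by omega
      rw [PySem.Int.bitLength_natCast hnpos, Function.iterate_succ_apply]
      have hband : PySem.Int.band (n : Int) 1 = ((n % 2 : Nat) : Int) := by
        have := PySem.Int.band_natCast n 1
        rw [Nat.and_one_is_mod] at this
        exact_mod_cast this
      have hshift : ((n : Int) >>> (1 : Nat)) = ((n / 2 : Nat) : Int) := by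
        rw [← Int.natCast_shiftRight]
        norm_num [Nat.shiftRight_eq_div_pow]
      simp only [hband, hshift]
      by_cases hpar : n % 2 = 0
      · rw [if_neg (by simp [hpar])]
        rw [ih (n / 2) (by omega) c, PySem.Int.bitCount_natCast hnpos, hpar]
        simp
      · have hpar1 : n % 2 = 1 := by omega
        rw [if_pos (by simp [hpar1])]
        rw [ih (n / 2) (by omega) (c + 1), PySem.Int.bitCount_natCast hnpos, hpar1]
        simp only [Prod.mk.injEq]
        exact ⟨by push_cast; ring, trivial⟩

-- bitCount = 1 characterises powers of two (positive naturals)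
theorem pv_bitCount_pos (n : Nat) (hn : 0 < n) : 0 < PySem.Int.bitCount (n : Int) := by
  induction n using Nat.strong_induction_on with
  | _ n ih =>
    rw [PySem.Int.bitCount_natCast hn]
    by_cases h2 : n / 2 = 0
    · have : n = 1 := by omega
      subst this; decide
    · have := ih (n / 2) (by omega) (by omega)
      omega

theorem pv_bitCount_one_iff (n : Nat) (hn : 0 < n) :
    PySem.Int.bitCount (n : Int) = 1 ↔ ∃ k, n = 2 ^ k := by
  induction n using Nat.strong_induction_on with
  | _ n ih =>
    by_cases h1 : n = 1
    · subst h1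
      constructor
      · intro _; exact ⟨0, rfl⟩
      · intro _; decide
    · have hn2 : 2 ≤ n := by omega
      rw [PySem.Int.bitCount_natCast hn]
      by_cases hpar : n % 2 = 0
      · -- even: n is a power of two iff n/2 is
        rw [hpar]
        have hhalfpos : 0 < n / 2 := by omega
        rw [Nat.zero_add, ih (n / 2) (by omega) hhalfpos]
        constructor
        · rintro ⟨k, hk⟩
          exact ⟨k + 1, by rw [pow_succ]; omega⟩
        · rintro ⟨k, hk⟩
          cases k with
          | zero => omega
          | succ k =>
            refine ⟨k, ?_⟩
            rw [pow_succ] at hk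
            omega
      · -- odd and ≥ 2: bitCount ≥ 2, and not a power of two
        have hpar1 : n % 2 = 1 := by omega
        rw [hpar1]
        have hhalfpos : 0 < n / 2 := by omega
        have hpos := pv_bitCount_pos (n / 2) hhalfpos
        constructor
        · intro h; omega
        · rintro ⟨k, hk⟩
          cases k with
          | zero => omega
          | succ k =>
            rw [pow_succ] at hk
            omega

-- A's helper returns true exactly on powers of two (for positive arguments)
theorem pv_is_power_of_two_iff (n : Nat) (hn : 0 < n) :
    pv_is_power_of_two (n : Int) = true ↔ ∃ k, n = 2 ^ k := by
  unfold pv_is_power_of_two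
  rw [pv_binlen n hn, pv_foldl_range_ignore, pv_counter_iterate n 0]
  simp only [beq_iff_eq, zero_add]
  rw [← pv_bitCount_one_iff n hn]
  constructor
  · intro h; exact_mod_cast h
  · intro h; exact_mod_cast h

-- the one step function of each port, named for the induction
def pvStepA (st : List Int × List Int) (i : Int) : List Int × List Int :=
  if pv_is_power_of_two (i + 1) then (st.1 ++ [i + 1], st.2)
  else (st.1, st.2 ++ [i + 1])

def pvStepB (st : List Int × List Int × Int) (i : Int) : List Int × List Int × Int :=
  if i == st.2.2 then (st.1 ++ [i], st.2.1, st.2.2 * 2)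
  else (st.1, st.2.1 ++ [i], st.2.2)

-- main invariant: after processing 1..n, B's state is A's two lists plus the least
-- power of two exceeding n
theorem pv_main (n : Nat) :
    ∃ j : Nat,
      (PySem.List.pyRange 1 ((n : Int) + 1) 1).foldl pvStepB ([], [], 1)
        = (((PySem.List.pyRange 0 (n : Int) 1).foldl pvStepA ([], [])).1,
           ((PySem.List.pyRange 0 (n : Int) 1).foldl pvStepA ([], [])).2,
           ((2 ^ j : Nat) : Int))
      ∧ n < 2 ^ j ∧ (j = 0 ∨ 2 ^ (j - 1) ≤ n) := by
  induction n with
  | zero =>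
    refine ⟨0, ?_, by omega, Or.inl rfl⟩
    norm_num
  | succ n ih =>
    obtain ⟨j, hst, hlt, hlow⟩ := ih
    have hA : PySem.List.pyRange 0 ((n : Int) + 1) 1
        = PySem.List.pyRange 0 (n : Int) 1 ++ [(n : Int)] := by
      exact PySem.List.pyRange_one_succ_right (by omega)
    have hB : PySem.List.pyRange 1 ((n : Int) + 1 + 1) 1
        = PySem.List.pyRange 1 ((n : Int) + 1) 1 ++ [(n : Int) + 1] := by
      exact PySem.List.pyRange_one_succ_right (by omega)
    by_cases hpow : ∃ k, n + 1 = 2 ^ k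
    · -- n+1 is a power of two: it must equal 2^j
      have hj : n + 1 = 2 ^ j := by
        obtain ⟨k, hk⟩ := hpow
        rcases Nat.lt_or_ge k j with hkj | hkj
        · rcases hlow with h0 | hlow
          · subst h0; simp at hlt; omega
          · have : 2 ^ k ≤ 2 ^ (j - 1) := Nat.pow_le_pow_right (by omega) (by omega)
            omega
        · have h1 : 2 ^ j ≤ 2 ^ k := Nat.pow_le_pow_right (by omega) hkj
          omega
      have hcondA : pv_is_power_of_two ((n : Int) + 1) = true := by
        have h := (pv_is_power_of_two_iff (n + 1) (by omega)).mpr hpow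
        push_cast at h
        exact h
      refine ⟨j + 1, ?_, ?_, Or.inr ?_⟩
      · push_cast
        rw [hB, List.foldl_append, hst, hA, List.foldl_append]
        simp only [List.foldl_cons, List.foldl_nil, pvStepA, pvStepB, hcondA, if_pos]
        have hceq : (((n : Int) + 1) == ((2 ^ j : Nat) : Int)) = true := by
          simp only [beq_iff_eq]
          rw [← hj]
          push_cast
          ring
        rw [hceq]
        simp only [if_pos]
        simp only [Prod.mk.injEq]
        refine ⟨trivial, trivial, ?_⟩
        push_cast
        ring
      · rw [pow_succ]; omega
      · simp only [Nat.add_sub_cancel]; omega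
    · -- n+1 is not a power of two: it is strictly below the pointer
      have hne : n + 1 ≠ 2 ^ j := fun h => hpow ⟨j, h⟩
      have hcondA : pv_is_power_of_two ((n : Int) + 1) = false := by
        have hiff := pv_is_power_of_two_iff (n + 1) (by omega)
        push_cast at hiff
        cases hc : pv_is_power_of_two ((n : Int) + 1)
        · rfl
        · exact absurd (hiff.mp hc) hpow
      refine ⟨j, ?_, by omega, ?_⟩
      · push_cast
        rw [hB, List.foldl_append, hst, hA, List.foldl_append]
        simp only [List.foldl_cons, List.foldl_nil, pvStepA, pvStepB, hcondA]
        have hceq : (((n : Int) + 1) == ((2 ^ j : Nat) : Int)) = false := by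
          simp only [beq_eq_false_iff_ne, ne_eq]
          intro h
          apply hne
          exact_mod_cast h
        rw [hceq]
        simp
      · rcases hlow with h0 | hlow
        · left; exact h0
        · right; omega

-- ===== VERDICT (by name: the statement is the Claim_ definition above) =====
theorem partition_by_is_power_of_two_spec : Claim_equal_partition_by_is_power_of_two := by
  intro num _
  unfold Spec_partition_by_is_power_of_two
  unfold partition_by_is_power_of_two partition_by_is_power_of_two_alt
  by_cases hle : num ≤ 0
  · have h1 : PySem.List.pyRange 0 num 1 = [] := by
      simp [PySem.List.pyRange]; omega
    have h2 : PySem.List.pyRange 1 (num + 1) 1 = [] := by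
      simp [PySem.List.pyRange]; omega
    rw [h1, h2]
    rfl
  · obtain ⟨n, rfl⟩ : ∃ n : Nat, num = (n : Int) := ⟨num.toNat, by omega⟩
    obtain ⟨j, hst, -, -⟩ := pv_main n
    show ((PySem.List.pyRange 0 (n : Int) 1).foldl pvStepA ([], []))
        = (let st := (PySem.List.pyRange 1 ((n : Int) + 1) 1).foldl pvStepB ([], [], 1);
           (st.1, st.2.1))
    rw [hst]
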